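-- pv_equiv track=rewrite | github.com/Airyshtoteles/learnLeetCode | Day41/Part1/time_warped_subarray_matching.py | build_odd_array
-- ===== SOURCE A (Python) =====
-- from typing import List
--
-- def factor_info(x: int):
--     if x == 0:
--         return (0, -1)  # odd part sentinel -1, exponent unused
--     e = 0
--     while x % 2 == 0:
--         x //= 2
--         e += 1
--     return (x, e)
--
-- def build_odd_array(arr: List[int]):
--     odd = []
--     exp = []
--     for v in arr:
--         o, e = factor_info(v)
--         odd.append(o)
--         exp.append(e)
--     return odd, exp
-- ===== SOURCE B (Python) =====
-- from typing import List
--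
-- def _split(v: int):
--     # closed-form 2-adic valuation: lowest set bit via v & -v, no division loop
--     if v == 0:
--         return (0, -1)
--     low = v & -v
--     return (v // low, low.bit_length() - 1)
--
-- def build_odd_array(arr: List[int]):
--     pairs = [_split(v) for v in arr]
--     return [o for o, _ in pairs], [e for _, e in pairs]
-- ===== Notes on version B (the rewrite author's own statement) =====
-- stated objective: alternative
-- what changed: Replaces factor_info's repeated-division-by-2 while loop with a closed-form bit computation (low = v & -v gives 2^e, exponent = low.bit_length()-1, odd part = v // low), and builds the two result lists by comprehension over precomputed pairs instead of appending inside an explicit loop.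
import Mathlib
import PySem

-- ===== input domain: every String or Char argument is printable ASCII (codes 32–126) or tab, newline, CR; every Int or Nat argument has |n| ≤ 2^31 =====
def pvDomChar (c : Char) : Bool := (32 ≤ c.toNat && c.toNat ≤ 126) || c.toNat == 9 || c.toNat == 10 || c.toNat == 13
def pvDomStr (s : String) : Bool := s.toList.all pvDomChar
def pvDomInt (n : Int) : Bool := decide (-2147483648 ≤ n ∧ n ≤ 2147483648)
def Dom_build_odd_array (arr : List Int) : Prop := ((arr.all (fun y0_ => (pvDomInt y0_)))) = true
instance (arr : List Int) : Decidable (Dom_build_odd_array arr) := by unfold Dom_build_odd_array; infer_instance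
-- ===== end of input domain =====

-- B replaces A's per-element repeated-division-by-2 loop with the closed-form lowest-set-bit
-- computation (v & -v, bit_length) and builds the lists by mapping instead of appending in a loop.

-- ===== PORT A =====
-- A's 'while x % 2 == 0: x //= 2; e += 1'; the 'x ≠ 0' conjunct is a totality guard only:
-- factor_info calls the loop with x ≠ 0, and halving an even nonzero x keeps it nonzero.
def pvFactorLoop (x : Int) (e : Int) : Int × Int :=
  if h : PySem.Int.mod x 2 = 0 ∧ x ≠ 0 then
    pvFactorLoop (PySem.Int.floordiv x 2) (e + 1)
  else
    (x, e)
termination_by x.natAbs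
decreasing_by
  rcases h with ⟨hm, hx⟩
  rw [PySem.Int.floordiv_eq_ediv_of_pos (by omega : (0:Int) < 2)]
  rcases (PySem.Int.mod_eq_zero_iff_dvd x 2).mp hm with ⟨w, hw⟩
  subst hw
  rw [Int.mul_ediv_cancel_left _ (by omega : (2:Int) ≠ 0)]
  omega

def factor_info (x : Int) : Int × Int :=
  if x = 0 then (0, -1) else pvFactorLoop x 0

def build_odd_array (arr : List Int) : List Int × List Int :=
  arr.foldl (fun acc v =>
    let p := factor_info v
    (acc.1 ++ [p.1], acc.2 ++ [p.2])) ([], [])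

-- ===== PORT B =====
-- '(0, -1) if v == 0 else (v // (v & -v), (v & -v).bit_length() - 1)';
-- bit_length is PySem.Int.bitLength, '&' is PySem.Int.band.
def pvSplit (v : Int) : Int × Int :=
  if v = 0 then (0, -1)
  else
    let low := PySem.Int.band v (-v)
    (PySem.Int.floordiv v low, ((PySem.Int.bitLength low - 1 : Nat) : Int))

def build_odd_array_alt (arr : List Int) : List Int × List Int :=
  let pairs := arr.map pvSplit
  (pairs.map Prod.fst, pairs.map Prod.snd)

-- ===== PRECONDITION & SPEC =====
def Spec_build_odd_array (arr : List Int) (out : List Int × List Int) : Prop := out = build_odd_array_alt arr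
instance (arr : List Int) (out : List Int × List Int) : Decidable (Spec_build_odd_array arr out) := by unfold Spec_build_odd_array; infer_instance

-- ===== CLAIM (what is proved, stated in full; the proofs are below) =====
def Claim_equal_build_odd_array : Prop := ∀ (arr : List Int), Dom_build_odd_array arr → Spec_build_odd_array arr (build_odd_array arr)

-- ===== LEMMAS AND PROOFS =====

-- (2b+1) & 2b = 2b, hence odd a has lowest set bit 1
theorem pv_land_odd (b : Nat) : (2*b+1) &&& (2*b) = 2*b := by
  apply Nat.eq_of_testBit_eq
  intro i
  cases i with
  | zero => simp [Nat.testBit_zero]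
  | succ k =>
      have h1 : (2*b+1)/2 = b := by omega
      have h2 : (2*b)/2 = b := by omega
      rw [Nat.testBit_land]
      simp only [Nat.testBit_succ, h1, h2]
      cases b.testBit k <;> simp

-- 2b & (2b-1) = 2·(b & (b-1)): the 'clear lowest bit' mask commutes with doubling
theorem pv_land_even (b : Nat) : (2*b) &&& (2*b-1) = 2*(b &&& (b-1)) := by
  apply Nat.eq_of_testBit_eq
  intro i
  cases i with
  | zero => simp [Nat.testBit_zero]
  | succ k =>
      have h1 : (2*b)/2 = b := by omega
      have h2 : (2*b-1)/2 = b-1 := by omega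
      have h3 : (2*(b &&& (b-1)))/2 = b &&& (b-1) := by omega
      rw [Nat.testBit_land]
      simp only [Nat.testBit_succ, h1, h2, h3, Nat.testBit_land]

-- Python's v & -v for nonzero v, through two's complement: |v| - (|v| & (|v|-1))
theorem pv_band_neg_self (v : Int) (hv : v ≠ 0) :
    PySem.Int.band v (-v) = ((v.natAbs - (v.natAbs &&& (v.natAbs - 1)) : Nat) : Int) := by
  rcases lt_trichotomy v 0 with h | h | h
  · have h1 : ¬ (0 ≤ v) := by omega
    have h2 : (0:Int) ≤ -v := by omega
    simp only [PySem.Int.band, h1, h2, if_true, if_false]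
    congr 1
    have h3 : (-v).toNat = v.natAbs := by omega
    have h4 : (-v - 1).toNat = v.natAbs - 1 := by omega
    rw [h3, h4]
  · exact absurd h hv
  · have h1 : (0:Int) ≤ v := by omega
    have h2 : ¬ ((0:Int) ≤ -v) := by omega
    simp only [PySem.Int.band, h1, h2, if_true, if_false]
    congr 1
    have h3 : v.toNat = v.natAbs := by omega
    have h4 : (-(-v) - 1).toNat = v.natAbs - 1 := by omega
    rw [h3, h4]

-- the loop equals B's closed form, by strong induction on |v|
theorem pv_loop_eq (a : Nat) (v e : Int) (hv : v ≠ 0) (ha : v.natAbs = a) :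
    pvFactorLoop v e =
      (PySem.Int.floordiv v (PySem.Int.band v (-v)),
       e + ((PySem.Int.bitLength (PySem.Int.band v (-v)) - 1 : Nat) : Int)) := by
  induction a using Nat.strong_induction_on generalizing v e with
  | _ a ih =>
    by_cases hm : PySem.Int.mod v 2 = 0
    · -- even v: one loop step, then the induction hypothesis at v/2
      rcases (PySem.Int.mod_eq_zero_iff_dvd v 2).mp hm with ⟨w, hw⟩
      have hw0 : w ≠ 0 := by rintro rfl; simp at hw; exact hv (by omega)
      have hdiv : PySem.Int.floordiv v 2 = w := by
        rw [PySem.Int.floordiv_eq_ediv_of_pos (by omega : (0:Int) < 2), hw,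
          Int.mul_ediv_cancel_left _ (by omega : (2:Int) ≠ 0)]
      have hband : PySem.Int.band v (-v) = 2 * PySem.Int.band w (-w) := by
        rw [pv_band_neg_self v hv, pv_band_neg_self w hw0]
        have hna : v.natAbs = 2 * w.natAbs := by rw [hw]; simp [Int.natAbs_mul]
        have hb0 : 0 < w.natAbs := by omega
        rw [hna, pv_land_even w.natAbs]
        have hle : w.natAbs &&& (w.natAbs - 1) ≤ w.natAbs - 1 := Nat.and_le_right
        omega
      have hBpos : 0 < PySem.Int.band w (-w) := by
        rw [pv_band_neg_self w hw0]
        have hle : w.natAbs &&& (w.natAbs - 1) ≤ w.natAbs - 1 := Nat.and_le_right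
        have : 0 < w.natAbs := by omega
        omega
      unfold pvFactorLoop
      simp only [hm, hv, ne_eq, not_false_eq_true, and_self, dif_pos, hdiv]
      rw [ih w.natAbs (by rw [hw] at ha; simp [Int.natAbs_mul] at ha; omega) w (e+1) hw0 rfl]
      congr 1
      · -- odd parts agree: (2w) // (2·low) = w // low
        rw [hband, hw, PySem.Int.floordiv_eq_ediv_of_pos hBpos,
          PySem.Int.floordiv_eq_ediv_of_pos (by omega),
          Int.mul_ediv_mul_of_pos _ _ (by omega : (0:Int) < 2)]
      · -- exponents agree: bitLength (2·low) = bitLength low + 1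
        rw [hband]
        have hbl : PySem.Int.bitLength (2 * PySem.Int.band w (-w)) =
            PySem.Int.bitLength (PySem.Int.band w (-w)) + 1 := by
          rw [PySem.Int.bitLength_of_pos (by omega)]
          congr 1
          rw [PySem.Int.floordiv_eq_ediv_of_pos (by omega : (0:Int) < 2),
            Int.mul_ediv_cancel_left _ (by omega : (2:Int) ≠ 0)]
        have hbl1 : 1 ≤ PySem.Int.bitLength (PySem.Int.band w (-w)) := by
          rw [PySem.Int.bitLength_of_pos hBpos]; omega
        rw [hbl]
        push_cast [Nat.add_sub_cancel]
        omega
    · -- odd v: the loop stops; v & -v = 1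
      have hband : PySem.Int.band v (-v) = 1 := by
        rw [pv_band_neg_self v hv]
        have hodd : v.natAbs % 2 = 1 := by
          have := PySem.Int.mod_eq_emod_of_pos (a := v) (by omega : (0:Int) < 2)
          omega
        obtain ⟨b, hb⟩ : ∃ b, v.natAbs = 2*b+1 := ⟨v.natAbs / 2, by omega⟩
        rw [hb]
        have : (2*b+1) - 1 = 2*b := by omega
        rw [this, pv_land_odd]
        omega
      unfold pvFactorLoop
      simp only [hm, false_and, dif_neg, not_false_eq_true]
      rw [hband]
      have : PySem.Int.bitLength 1 = 1 := by decide
      rw [this]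
      have : PySem.Int.floordiv v 1 = v := by
        rw [PySem.Int.floordiv_eq_ediv_of_pos (by omega : (0:Int) < 1)]; simp
      rw [this]
      simp

theorem pv_split_eq (v : Int) : factor_info v = pvSplit v := by
  by_cases hv : v = 0
  · simp [factor_info, pvSplit, hv]
  · simp only [factor_info, pvSplit, hv, if_false]
    rw [pv_loop_eq v.natAbs v 0 hv rfl]
    simp

theorem pv_fold_eq (arr : List Int) (o e : List Int) :
    arr.foldl (fun acc v =>
      let p := factor_info v
      (acc.1 ++ [p.1], acc.2 ++ [p.2])) (o, e) =
    (o ++ (arr.map pvSplit).map Prod.fst, e ++ (arr.map pvSplit).map Prod.snd) := by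
  induction arr generalizing o e with
  | nil => simp
  | cons x xs ih =>
      rw [List.foldl_cons, ih]
      simp [pv_split_eq]

-- ===== VERDICT (by name: the statement is the Claim_ definition above) =====
theorem build_odd_array_spec : Claim_equal_build_odd_array := by
  intro arr _
  unfold Spec_build_odd_array build_odd_array build_odd_array_alt
  rw [pv_fold_eq]
  simp
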